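-- pv_equiv track=rewrite | github.com/Mookiefer/AdventOfCode | 2015/day11_1.py | letter_change
-- ===== SOURCE A (Python) =====
-- def letter_change(word, index):
-- 	change = word
-- 	if word[index] == 'z':
-- 		change[index] = 'a'
-- 		letter_change(word, index-1)
-- 	else:
-- 		new_letter = chr(ord(word[index]) + 1)
-- 		if new_letter in ['i', 'o', 'l']:
-- 			new_letter = chr(ord(word[index]) + 2)
-- 		change[index] = new_letter
-- 	return change
-- ===== SOURCE B (Python) =====
-- def letter_change(word, index):
--     # iterative carry loop instead of tail recursion; same in-place mutation
--     while word[index] == 'z':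
--         word[index] = 'a'
--         index -= 1
--     c = word[index]
--     word[index] = chr(ord(c) + (2 if c in 'hkn' else 1))
--     return word
-- ===== Notes on version B (the rewrite author's own statement) =====
-- stated objective: simpler
-- what changed: The carry over 'z' is an explicit while-loop instead of tail recursion, and the skip of 'i'/'o'/'l' is folded into a single chr(ord(c)+step) with step chosen by testing the OLD character against 'hkn', instead of computing the successor twice.
import Mathlib
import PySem

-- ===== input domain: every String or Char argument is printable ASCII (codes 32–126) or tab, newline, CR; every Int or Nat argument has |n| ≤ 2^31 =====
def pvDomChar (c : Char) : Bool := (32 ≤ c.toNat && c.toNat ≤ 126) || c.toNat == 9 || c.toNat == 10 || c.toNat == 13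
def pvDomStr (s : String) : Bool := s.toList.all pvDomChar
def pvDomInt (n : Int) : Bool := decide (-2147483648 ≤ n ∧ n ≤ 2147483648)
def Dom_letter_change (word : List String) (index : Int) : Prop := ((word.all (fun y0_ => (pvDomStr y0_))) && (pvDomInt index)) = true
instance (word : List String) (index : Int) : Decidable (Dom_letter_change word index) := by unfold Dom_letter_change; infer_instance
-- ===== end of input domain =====

-- B replaces A's tail recursion over the carry chain by an explicit loop plus one final
-- increment whose step (1 or 2) is chosen by testing the OLD character against 'h','k','n';
-- objective: simpler.  Both Pythons mutate `word` in place and return the same alias, and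
-- both perform the same writes, so matching return values cover the observable effect too.

-- ===== PORT A =====
-- A's computation of new_letter: chr(ord(ch)+1), bumped to chr(ord(ch)+2) if it lands on i/o/l
def lc_newletter (ch : Char) : Char :=
  let new1 := Char.ofNat (ch.toNat + 1)
  if new1 = 'i' ∨ new1 = 'o' ∨ new1 = 'l' then Char.ofNat (ch.toNat + 2) else new1

-- literal transliteration of A: recursion threading the in-place updates; where Python
-- raises (IndexError: pyGet? = none; TypeError: ord of a non-single-char string) the port
-- returns the current list — those inputs are outside Pre_letter_change
def letter_change (word : List String) (index : Int) : List String :=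
  match h : PySem.List.pyGet? word index with
  | none => word      -- Python: IndexError
  | some c =>
    if c == "z" then
      letter_change (PySem.List.pySetD word index "a") (index - 1)
    else
      match c.toList with
      | [ch] => PySem.List.pySetD word index (String.ofList [lc_newletter ch])
      | _ => word     -- Python: TypeError in ord()
termination_by (index + (word.length : Int) + 1).toNat
decreasing_by
  have hin : PySem.Raise.InRange word.length index := by
    by_contra hn
    rw [← PySem.List.pyGet?_eq_none_iff] at hn
    simp [hn] at h
  rw [PySem.List.length_pySetD]
  rcases hin with ⟨h1, h2⟩
  omega

-- ===== PORT B =====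
-- B's while-loop: carry 'z' → 'a' moving left; returns the mutated list and the final
-- index (the loop condition `word[index] == 'z'` is false on IndexError inputs, which the
-- final assignment then reports — those are outside Pre_letter_change)
def lc_carry (word : List String) (index : Int) : List String × Int :=
  if h : PySem.List.pyGet? word index = some "z" then
    lc_carry (PySem.List.pySetD word index "a") (index - 1)
  else (word, index)
termination_by (index + (word.length : Int) + 1).toNat
decreasing_by
  have hin : PySem.Raise.InRange word.length index := by
    by_contra hn
    rw [← PySem.List.pyGet?_eq_none_iff] at hn
    simp [hn] at h
  rw [PySem.List.length_pySetD]
  rcases hin with ⟨h1, h2⟩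
  omega

-- B's single assignment after the loop: word[index] = chr(ord(c) + (2 if c in 'hkn' else 1))
def lc_bump (word : List String) (index : Int) : List String :=
  (PySem.List.pyGet? word index).elim word (fun c =>   -- none: Python raises IndexError
    if c.toList.length = 1 then
      let ch := c.toList.headD ' '
      PySem.List.pySetD word index
        (String.ofList [Char.ofNat (ch.toNat + (if ch = 'h' ∨ ch = 'k' ∨ ch = 'n' then 2 else 1))])
    else word)   -- Python: TypeError in ord()
def letter_change_alt (word : List String) (index : Int) : List String :=
  let p := lc_carry word index
  lc_bump p.1 p.2

-- ===== PRECONDITION & SPEC =====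
-- the positions A's carry chain scans: the resolved start index down to 0, then — only when
-- index ≥ 0, via Python's negative-index wraparound — n-1 down to just above the start
def lcScan (word : List String) (index : Int) : List Nat :=
  let n := word.length
  let j := (if index < 0 then index + n else index).toNat
  if index < 0 then (List.range (j + 1)).reverse
  else (List.range (j + 1)).reverse ++ (List.range' (j + 1) (n - (j + 1))).reverse

-- the first non-'z' cell the chain meets must be a single character (else ord() raises
-- TypeError); if every scanned cell is 'z' the chain falls off the front (IndexError)
-- unless it started at a nonnegative index, where it wraps onto its own fresh 'a'
def lcOk (word : List String) (index : Int) : Bool :=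
  match (lcScan word index).find? (fun p => word.getD p "" != "z") with
  | some p => (word.getD p "").length == 1
  | none => decide (0 ≤ index)

-- Pre_ = exactly the inputs on which Python A returns normally (no IndexError/TypeError)
def Pre_letter_change (word : List String) (index : Int) : Prop :=
  word ≠ [] ∧ -(word.length : Int) ≤ index ∧ index < word.length ∧ lcOk word index = true
instance (word : List String) (index : Int) : Decidable (Pre_letter_change word index) := by
  unfold Pre_letter_change; infer_instance

def pvWitness_letter_change : List String × Int := (["a", "z"], 1)

def Spec_letter_change (word : List String) (index : Int) (out : List String) : Prop := out = letter_change_alt word index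
instance (word : List String) (index : Int) (out : List String) : Decidable (Spec_letter_change word index out) := by unfold Spec_letter_change; infer_instance

-- ===== CLAIM (what is proved, stated in full; the proofs are below) =====
def Claim_equal_letter_change : Prop := ∀ (word : List String) (index : Int), Dom_letter_change word index → Pre_letter_change word index → Spec_letter_change word index (letter_change word index)

-- ===== LEMMAS AND PROOFS =====

theorem toNat_ofNat' (m : Nat) : (Char.ofNat m).toNat = if m.isValidChar then m else 0 := by
  simp [Char.ofNat]
  split
  · rename_i h; simp [Char.ofNatAux, Char.toNat]
  · simp [Char.toNat]

theorem char_toNat_inj {a b : Char} (h : a.toNat = b.toNat) : a = b := by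
  apply Char.ext
  apply UInt32.toNat_inj.mp
  exact h

theorem ofNat_eq_lit (m : Nat) (c : Char) (hvc : c.toNat.isValidChar) (h0 : c.toNat ≠ 0) :
    Char.ofNat m = c ↔ m = c.toNat := by
  constructor
  · intro h
    have := congrArg Char.toNat h
    rw [toNat_ofNat'] at this
    split at this
    · exact this
    · exact absurd this.symm h0
  · intro h; subst h
    apply char_toNat_inj
    rw [toNat_ofNat']
    simp [hvc]

-- A's two-step i/o/l skip equals B's one-step chr(ord(c) + (2 if c in 'hkn' else 1))
theorem bump_char_eq (ch : Char) :
    lc_newletter ch = Char.ofNat (ch.toNat + (if ch = 'h' ∨ ch = 'k' ∨ ch = 'n' then 2 else 1)) := by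
  by_cases hh : ch = 'h'
  · subst hh; decide
  by_cases hk : ch = 'k'
  · subst hk; decide
  by_cases hn : ch = 'n'
  · subst hn; decide
  have hi : ¬ Char.ofNat (ch.toNat + 1) = 'i' := by
    rw [ofNat_eq_lit _ _ (by decide) (by decide)]
    intro h
    apply hh; apply char_toNat_inj
    have e1 : ('i').toNat = 105 := by decide
    have e2 : ('h').toNat = 104 := by decide
    omega
  have ho : ¬ Char.ofNat (ch.toNat + 1) = 'o' := by
    rw [ofNat_eq_lit _ _ (by decide) (by decide)]
    intro h
    apply hn; apply char_toNat_inj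
    have e1 : ('o').toNat = 111 := by decide
    have e2 : ('n').toNat = 110 := by decide
    omega
  have hl : ¬ Char.ofNat (ch.toNat + 1) = 'l' := by
    rw [ofNat_eq_lit _ _ (by decide) (by decide)]
    intro h
    apply hk; apply char_toNat_inj
    have e1 : ('l').toNat = 108 := by decide
    have e2 : ('k').toNat = 107 := by decide
    omega
  simp [lc_newletter, hh, hk, hn, hi, ho, hl]

-- A's recursion computes exactly: run B's carry loop, then B's final increment
theorem carry_eq (word : List String) (index : Int) :
    letter_change word index = lc_bump (lc_carry word index).1 (lc_carry word index).2 := by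
  fun_induction letter_change word index with
  | case1 w i h =>
    have hstop : lc_carry w i = (w, i) := by
      rw [lc_carry.eq_def]; simp [h]
    rw [hstop]; simp [lc_bump, h]
  | case2 w i c h hz ih =>
    have hz' : c = "z" := by simpa using hz
    have hstep : lc_carry w i = lc_carry (PySem.List.pySetD w i "a") (i - 1) := by
      rw [lc_carry.eq_def]; simp [h, hz']
    rw [hstep]; exact ih
  | case3 w i c h hz ch hch =>
    have hz' : ¬ c = "z" := by simpa using hz
    have hstop : lc_carry w i = (w, i) := by
      rw [lc_carry.eq_def]; simp [h, hz']
    have hlen : c.length = 1 := by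
      have := congrArg List.length hch
      simpa using this
    rw [hstop]; simp [lc_bump, h, hch, hlen, bump_char_eq]
  | case4 w i c h hz hch =>
    have hz' : ¬ c = "z" := by simpa using hz
    have hstop : lc_carry w i = (w, i) := by
      rw [lc_carry.eq_def]; simp [h, hz']
    have hlen : ¬ c.length = 1 := by
      intro hl
      rw [show c.length = c.toList.length by simp, List.length_eq_one_iff] at hl
      rcases hl with ⟨a, ha⟩
      exact hch a ha
    rw [hstop]; simp [lc_bump, h, hlen]

-- ===== VERDICT (by name: the statement is the Claim_ definition above) =====
theorem letter_change_spec : Claim_equal_letter_change := by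
  intro word index _ _
  unfold Spec_letter_change letter_change_alt
  exact carry_eq word index
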